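-- pv_equiv track=rewrite | github.com/imkoi/godot-skills | godot_verify.py | extract_warnings_and_errors
-- ===== SOURCE A (Python) =====
-- def extract_warnings_and_errors(output: str):
--     lines = []
--     errors = 0
--     warnings = 0
--
--     for line in output.splitlines():
--         upper = line.upper()
--         if "ERROR" in upper:
--             errors += 1
--             lines.append(line.strip())
--         elif "WARNING" in upper:
--             warnings += 1
--             lines.append(line.strip())
--
--     return errors, warnings, lines
-- ===== SOURCE B (Python) =====
-- def extract_warnings_and_errors(output: str):
--     lines = [line.strip() for line in output.splitlines()
--              if "ERROR" in line.upper() or "WARNING" in line.upper()]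
--     errors = sum(1 for line in output.splitlines() if "ERROR" in line.upper())
--     return errors, len(lines) - errors, lines
-- ===== Notes on version B (the rewrite author's own statement) =====
-- stated objective: alternative
-- what changed: Replaces the fused single-pass loop with three mutable accumulators by a filter-then-count decomposition: collect matching lines by comprehension, count ERROR lines separately, and derive the warning count as len(lines) - errors.
import Mathlib
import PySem

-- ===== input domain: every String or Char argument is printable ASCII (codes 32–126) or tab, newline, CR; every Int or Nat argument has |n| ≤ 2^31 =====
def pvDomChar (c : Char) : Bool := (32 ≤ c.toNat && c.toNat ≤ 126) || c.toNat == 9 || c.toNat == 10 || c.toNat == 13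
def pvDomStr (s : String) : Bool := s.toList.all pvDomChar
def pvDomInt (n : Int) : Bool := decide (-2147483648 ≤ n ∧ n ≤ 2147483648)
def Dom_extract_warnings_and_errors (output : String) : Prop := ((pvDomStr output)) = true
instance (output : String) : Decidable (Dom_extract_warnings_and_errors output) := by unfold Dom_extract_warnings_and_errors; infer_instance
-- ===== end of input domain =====

-- B replaces A's fused single-pass three-accumulator loop by a filter-then-count
-- decomposition (collect matches, count ERROR lines, derive warnings = len - errors);
-- objective: alternative (same cost, different shape).

-- ===== PORT A =====
def extract_warnings_and_errors (output : String) : Int × Int × List String :=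
  let st := (PySem.Str.splitlines output).foldl
    (fun (st : List String × Int × Int) line =>
      let upper := PySem.Str.upper line
      if PySem.Str.isIn "ERROR" upper then
        (st.1 ++ [PySem.Str.strip line], st.2.1 + 1, st.2.2)
      else if PySem.Str.isIn "WARNING" upper then
        (st.1 ++ [PySem.Str.strip line], st.2.1, st.2.2 + 1)
      else st) ([], 0, 0)
  (st.2.1, st.2.2, st.1)

-- ===== PORT B =====
def extract_warnings_and_errors_alt (output : String) : Int × Int × List String :=
  let ls := PySem.Str.splitlines output
  let lines := (ls.filter (fun l =>
      PySem.Str.isIn "ERROR" (PySem.Str.upper l) || PySem.Str.isIn "WARNING" (PySem.Str.upper l))).map PySem.Str.strip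
  let errors : Int := (ls.countP (fun l => PySem.Str.isIn "ERROR" (PySem.Str.upper l)) : Int)
  (errors, (lines.length : Int) - errors, lines)

-- ===== PRECONDITION & SPEC =====
def Spec_extract_warnings_and_errors (output : String) (out : Int × Int × List String) : Prop := out = extract_warnings_and_errors_alt output
instance (output : String) (out : Int × Int × List String) : Decidable (Spec_extract_warnings_and_errors output out) := by unfold Spec_extract_warnings_and_errors; infer_instance

-- ===== CLAIM (what is proved, stated in full; the proofs are below) =====
def Claim_equal_extract_warnings_and_errors : Prop := ∀ (output : String), Dom_extract_warnings_and_errors output → Spec_extract_warnings_and_errors output (extract_warnings_and_errors output)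

-- ===== LEMMAS AND PROOFS =====

-- Invariant of A's loop (stated for arbitrary keyword strings eS, wS): the
-- accumulator after folding over l equals the starting accumulator extended by
-- B's filter/count-shaped quantities over l.
theorem pv_fold_inv (eS wS : String) (l : List String) (lines : List String) (e w : Int) :
    l.foldl
      (fun (st : List String × Int × Int) line =>
        let upper := PySem.Str.upper line
        if PySem.Str.isIn eS upper then
          (st.1 ++ [PySem.Str.strip line], st.2.1 + 1, st.2.2)
        else if PySem.Str.isIn wS upper then
          (st.1 ++ [PySem.Str.strip line], st.2.1, st.2.2 + 1)
        else st) (lines, e, w)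
    = (lines ++ (l.filter (fun s =>
          PySem.Str.isIn eS (PySem.Str.upper s) || PySem.Str.isIn wS (PySem.Str.upper s))).map PySem.Str.strip,
       e + (l.countP (fun s => PySem.Str.isIn eS (PySem.Str.upper s)) : Int),
       w + (((l.filter (fun s =>
          PySem.Str.isIn eS (PySem.Str.upper s) || PySem.Str.isIn wS (PySem.Str.upper s))).length : Int)
         - (l.countP (fun s => PySem.Str.isIn eS (PySem.Str.upper s)) : Int))) := by
  induction l generalizing lines e w with
  | nil => simp
  | cons x xs ih =>
    simp only [List.foldl_cons]
    simp only [PySem.Str.isIn_eq, PySem.Str.toList_upper] at ih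
    by_cases hE : PySem.Str.isIn eS (PySem.Str.upper x) = true
    · simp at hE
      simp [hE, ih]
      omega
    · by_cases hW : PySem.Str.isIn wS (PySem.Str.upper x) = true
      · simp at hE hW
        simp [hE, hW, ih]
        omega
      · simp at hE hW
        simp [hE, hW, ih]

-- ===== VERDICT (by name: the statement is the Claim_ definition above) =====
theorem extract_warnings_and_errors_spec : Claim_equal_extract_warnings_and_errors := by
  intro output _
  unfold Spec_extract_warnings_and_errors extract_warnings_and_errors extract_warnings_and_errors_alt
  rw [pv_fold_inv]
  simp
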